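-- pv_equiv track=rewrite | github.com/anviks/advent-of-code | 2024/day_2/solution.py | find_fault
-- ===== SOURCE A (Python) =====
-- def find_fault(report: list[int]):
--     direction = 0
--
--     for i, (a, b) in enumerate(zip(report, report[1:])):
--         if a == b or a > b and direction == 1 or a < b and direction == -1 or abs(a - b) > 3:
--             return i
--         elif a > b:
--             direction = -1
--         elif a < b:
--             direction = 1
--
--     return -1
-- ===== SOURCE B (Python) =====
-- def find_fault(report: list[int]):
--     diffs = [b - a for a, b in zip(report, report[1:])]
--
--     def prefix_len(allowed):
--         n = 0
--         while n < len(diffs) and diffs[n] in allowed: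
--             n += 1
--         return n
--
--     k = max(prefix_len((1, 2, 3)), prefix_len((-1, -2, -3)))
--     return -1 if k == len(diffs) else k
-- ===== Notes on version B (the rewrite author's own statement) =====
-- stated objective: alternative
-- what changed: B has no direction state machine and no per-step fault condition: it computes the lengths of the longest all-in-{1,2,3} and all-in-{-1,-2,-3} prefixes of the diff list and returns their maximum, or -1 if that maximum spans every diff.
import Mathlib
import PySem

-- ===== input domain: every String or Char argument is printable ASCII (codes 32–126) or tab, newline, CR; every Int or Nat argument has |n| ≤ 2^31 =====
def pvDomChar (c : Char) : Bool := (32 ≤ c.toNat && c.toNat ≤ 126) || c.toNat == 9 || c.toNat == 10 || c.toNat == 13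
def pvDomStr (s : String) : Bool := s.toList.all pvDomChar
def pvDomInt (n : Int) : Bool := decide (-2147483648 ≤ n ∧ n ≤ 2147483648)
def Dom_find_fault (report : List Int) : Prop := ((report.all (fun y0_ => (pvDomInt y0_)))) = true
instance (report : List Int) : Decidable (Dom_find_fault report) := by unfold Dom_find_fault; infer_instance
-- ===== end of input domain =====

-- B replaces A's running-direction state machine by two monotone-prefix lengths of the
-- diff list (longest all-in-{1,2,3} / all-in-{-1,-2,-3} prefix) and takes their max: alternative decomposition, same cost.


-- ===== PORT A =====
-- the for-loop over enumerate(zip(report, report[1:])) with the running `direction` state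
def findFaultLoop (i : Int) (direction : Int) : List (Int × Int) → Int
  | [] => -1
  | (a, b) :: rest =>
      if a = b ∨ (a > b ∧ direction = 1) ∨ (a < b ∧ direction = -1) ∨ (a - b).natAbs > 3 then
        i
      else if a > b then findFaultLoop (i + 1) (-1) rest
      else if a < b then findFaultLoop (i + 1) 1 rest
      else findFaultLoop (i + 1) direction rest

def find_fault (report : List Int) : Int :=
  -- report[1:] is exactly List.drop 1 for a nonnegative start
  findFaultLoop 0 0 (report.zip (report.drop 1))

-- ===== PORT B =====
-- the while-loop of prefix_len: count how many leading diffs lie in `allowed`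
def prefixLen (allowed : Int → Bool) : List Int → Nat
  | [] => 0
  | d :: rest => if allowed d then prefixLen allowed rest + 1 else 0

def find_fault_alt (report : List Int) : Int :=
  let diffs := (report.zip (report.drop 1)).map (fun p => p.2 - p.1)
  let k := max (prefixLen (fun d => d == 1 || d == 2 || d == 3) diffs)
               (prefixLen (fun d => d == -1 || d == -2 || d == -3) diffs)
  if k = diffs.length then -1 else (k : Int)

-- ===== PRECONDITION & SPEC =====
def Spec_find_fault (report : List Int) (out : Int) : Prop := out = find_fault_alt report
instance (report : List Int) (out : Int) : Decidable (Spec_find_fault report out) := by unfold Spec_find_fault; infer_instance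

-- ===== CLAIM (what is proved, stated in full; the proofs are below) =====
def Claim_equal_find_fault : Prop := ∀ (report : List Int), Dom_find_fault report → Spec_find_fault report (find_fault report)

-- ===== LEMMAS AND PROOFS =====

-- with direction fixed at 1, A's loop returns i + (longest {1,2,3}-prefix of the diffs), or -1 at the end
theorem loop_pos (pairs : List (Int × Int)) (i dir : Int) (hdir : dir = 1) :
    findFaultLoop i dir pairs =
      (if prefixLen (fun d => d == 1 || d == 2 || d == 3) (pairs.map (fun p => p.2 - p.1))
          = pairs.length then -1
       else i + (prefixLen (fun d => d == 1 || d == 2 || d == 3) (pairs.map (fun p => p.2 - p.1)) : Int)) := by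
  induction pairs generalizing i dir with
  | nil => simp [findFaultLoop, prefixLen]
  | cons p rest ih =>
      obtain ⟨a, b⟩ := p
      simp only [findFaultLoop, List.map, prefixLen, List.length]
      by_cases hok : (b - a == 1 || b - a == 2 || b - a == 3) = true
      · simp only [Bool.or_eq_true, beq_iff_eq] at hok
        rw [if_neg (by omega : ¬ (a = b ∨ (a > b ∧ dir = 1) ∨ (a < b ∧ dir = -1) ∨ (a - b).natAbs > 3)),
            if_neg (by omega : ¬ a > b), if_pos (by omega : a < b),
            ih (i + 1) 1 rfl,
            if_pos (by simp only [Bool.or_eq_true, beq_iff_eq]; omega :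
              ((fun d => d == 1 || d == 2 || d == 3) (b - a)) = true)]
        by_cases hfin : prefixLen (fun d => d == 1 || d == 2 || d == 3) (rest.map (fun p => p.2 - p.1))
            = rest.length
        · simp [hfin]
        · rw [if_neg hfin, if_neg (by omega)]; push_cast; ring
      · simp only [Bool.or_eq_true, beq_iff_eq] at hok
        rw [if_pos (by omega : (a = b ∨ (a > b ∧ dir = 1) ∨ (a < b ∧ dir = -1) ∨ (a - b).natAbs > 3)),
            if_neg (by simp only [Bool.or_eq_true, beq_iff_eq]; omega :
              ¬ ((fun d => d == 1 || d == 2 || d == 3) (b - a)) = true),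
            if_neg (by omega : ¬ (0 = rest.length + 1))]
        simp
-- symmetric: direction fixed at -1
theorem loop_neg (pairs : List (Int × Int)) (i dir : Int) (hdir : dir = -1) :
    findFaultLoop i dir pairs =
      (if prefixLen (fun d => d == -1 || d == -2 || d == -3) (pairs.map (fun p => p.2 - p.1))
          = pairs.length then -1
       else i + (prefixLen (fun d => d == -1 || d == -2 || d == -3) (pairs.map (fun p => p.2 - p.1)) : Int)) := by
  induction pairs generalizing i dir with
  | nil => simp [findFaultLoop, prefixLen]
  | cons p rest ih =>
      obtain ⟨a, b⟩ := p
      simp only [findFaultLoop, List.map, prefixLen, List.length]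
      by_cases hok : (b - a == -1 || b - a == -2 || b - a == -3) = true
      · simp only [Bool.or_eq_true, beq_iff_eq] at hok
        rw [if_neg (by omega : ¬ (a = b ∨ (a > b ∧ dir = 1) ∨ (a < b ∧ dir = -1) ∨ (a - b).natAbs > 3)),
            if_pos (by omega : a > b),
            ih (i + 1) (-1) rfl,
            if_pos (by simp only [Bool.or_eq_true, beq_iff_eq]; omega :
              ((fun d => d == -1 || d == -2 || d == -3) (b - a)) = true)]
        by_cases hfin : prefixLen (fun d => d == -1 || d == -2 || d == -3) (rest.map (fun p => p.2 - p.1))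
            = rest.length
        · simp [hfin]
        · rw [if_neg hfin, if_neg (by omega)]; push_cast; ring
      · simp only [Bool.or_eq_true, beq_iff_eq] at hok
        rw [if_pos (by omega : (a = b ∨ (a > b ∧ dir = 1) ∨ (a < b ∧ dir = -1) ∨ (a - b).natAbs > 3)),
            if_neg (by simp only [Bool.or_eq_true, beq_iff_eq]; omega :
              ¬ ((fun d => d == -1 || d == -2 || d == -3) (b - a)) = true),
            if_neg (by omega : ¬ (0 = rest.length + 1))]
        simp

-- ===== VERDICT (by name: the statement is the Claim_ definition above) =====
theorem find_fault_spec : Claim_equal_find_fault := by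
  intro report _
  show find_fault report = find_fault_alt report
  unfold find_fault find_fault_alt
  cases hp : report.zip (report.drop 1) with
  | nil => simp [findFaultLoop, prefixLen]
  | cons p rest =>
      obtain ⟨a, b⟩ := p
      simp only [findFaultLoop, List.map, prefixLen, List.length, List.length_map]
      by_cases h0 : a = b ∨ (a - b).natAbs > 3
      · -- first diff already faulty: A returns 0; both prefixes are empty, k = 0 < length
        rw [if_pos (by omega : (a = b ∨ (a > b ∧ (0:Int) = 1) ∨ (a < b ∧ (0:Int) = -1) ∨ (a - b).natAbs > 3)),
            if_neg (by simp only [Bool.or_eq_true, beq_iff_eq]; omega :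
              ¬ ((fun d => d == 1 || d == 2 || d == 3) (b - a)) = true),
            if_neg (by simp only [Bool.or_eq_true, beq_iff_eq]; omega :
              ¬ ((fun d => d == -1 || d == -2 || d == -3) (b - a)) = true)]
        simp
      · rw [if_neg (by omega : ¬ (a = b ∨ (a > b ∧ (0:Int) = 1) ∨ (a < b ∧ (0:Int) = -1) ∨ (a - b).natAbs > 3))]
        by_cases hgt : a > b
        · -- decreasing first diff: A continues with direction -1; the positive prefix is empty
          rw [if_pos hgt, loop_neg rest (0 + 1) (-1) rfl,
              if_neg (by simp only [Bool.or_eq_true, beq_iff_eq]; omega :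
                ¬ ((fun d => d == 1 || d == 2 || d == 3) (b - a)) = true),
              if_pos (by simp only [Bool.or_eq_true, beq_iff_eq]; omega :
                ((fun d => d == -1 || d == -2 || d == -3) (b - a)) = true)]
          simp only [Nat.zero_max]
          by_cases hfin : prefixLen (fun d => d == -1 || d == -2 || d == -3) (rest.map (fun p => p.2 - p.1))
              = rest.length
          · simp [hfin]
          · rw [if_neg hfin, if_neg (by omega)]; push_cast; ring
        · -- increasing first diff: A continues with direction 1; the negative prefix is empty
          have hlt : a < b := by omega
          rw [if_neg hgt, if_pos hlt, loop_pos rest (0 + 1) 1 rfl,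
              if_pos (by simp only [Bool.or_eq_true, beq_iff_eq]; omega :
                ((fun d => d == 1 || d == 2 || d == 3) (b - a)) = true),
              if_neg (by simp only [Bool.or_eq_true, beq_iff_eq]; omega :
                ¬ ((fun d => d == -1 || d == -2 || d == -3) (b - a)) = true)]
          simp only [Nat.max_zero]
          by_cases hfin : prefixLen (fun d => d == 1 || d == 2 || d == 3) (rest.map (fun p => p.2 - p.1))
              = rest.length
          · simp [hfin]
          · rw [if_neg hfin, if_neg (by omega)]; push_cast; ring
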